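-- pv_equiv track=rewrite | github.com/JulianKemmerer/PipelineC | src/QUARTUS.py | NODE_TO_ELEM
-- ===== SOURCE A (Python) =====
-- def NODE_TO_ELEM(node_str):
--     node_str = node_str.replace("|", "/")
--     elem_str = node_str
--     if ":" in node_str:
--         # inst name is right tok, func name is left tok
--         hier_toks = node_str.split("/")
--         new_hier_toks = []
--         for hier_tok in hier_toks:
--             toks = hier_tok.split(":")
--             new_hier_toks.append(toks[len(toks) - 1])
--         elem_str = "/".join(new_hier_toks)
--
--     return elem_str
-- ===== SOURCE B (Python) =====
-- def NODE_TO_ELEM(node_str):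
--     # single left-to-right pass: '|'/'/' close a segment, ':' resets the
--     # current token, so each emitted piece is the segment's last ':'-token
--     parts = []
--     seg = []
--     for c in node_str:
--         if c == "|" or c == "/":
--             parts.append("".join(seg))
--             seg = []
--         elif c == ":":
--             seg = []
--         else:
--             seg.append(c)
--     parts.append("".join(seg))
--     return "/".join(parts)
-- ===== Notes on version B (the rewrite author's own statement) =====
-- stated objective: alternative
-- what changed: Replaces A's guard + split('/')/inner split(':')/join pipeline with a single left-to-right character scan that closes a segment on '|' or '/' and resets the current token on ':'; no replace pass, no nested splits, no branch on ':' presence.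
import Mathlib
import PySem

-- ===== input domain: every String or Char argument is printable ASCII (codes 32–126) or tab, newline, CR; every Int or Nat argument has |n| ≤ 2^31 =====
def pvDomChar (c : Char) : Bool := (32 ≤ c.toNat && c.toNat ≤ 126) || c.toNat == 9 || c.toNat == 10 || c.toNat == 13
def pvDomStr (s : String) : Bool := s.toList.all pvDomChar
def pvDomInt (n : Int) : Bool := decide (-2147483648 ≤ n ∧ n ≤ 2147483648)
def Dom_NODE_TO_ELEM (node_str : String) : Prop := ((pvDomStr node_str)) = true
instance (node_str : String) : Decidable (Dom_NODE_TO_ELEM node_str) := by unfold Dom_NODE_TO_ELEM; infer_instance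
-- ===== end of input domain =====

-- B replaces A's guard + split('/') / inner split(':') / join pipeline with a single
-- left-to-right character scan (alternative decomposition, same O(n) cost).

-- ===== PORT A =====
def NODE_TO_ELEM (node_str : String) : String :=
  let node_str := PySem.Str.replace node_str "|" "/"
  let elem_str := node_str
  if PySem.Str.isIn ":" node_str then
    let hier_toks := (PySem.Str.split? node_str "/").getD []   -- sep "/" is nonempty: split? is never none
    let new_hier_toks := hier_toks.foldl (fun acc hier_tok =>
      let toks := (PySem.Str.split? hier_tok ":").getD []      -- sep ":" is nonempty: split? is never none
      acc ++ [PySem.List.pyGetD toks ((toks.length : Int) - 1) ""]) ([] : List String)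
    PySem.Str.join "/" new_hier_toks
  else
    elem_str

-- ===== PORT B =====
def NODE_TO_ELEM_alt (node_str : String) : String :=
  let step := fun (st : List String × List Char) (c : Char) =>
    if c = '|' || c = '/' then (st.1 ++ [String.ofList st.2], ([] : List Char))
    else if c = ':' then (st.1, [])
    else (st.1, st.2 ++ [c])
  let st := node_str.toList.foldl step ([], [])
  PySem.Str.join "/" (st.1 ++ [String.ofList st.2])

-- ===== PRECONDITION & SPEC =====
def Spec_NODE_TO_ELEM (node_str : String) (out : String) : Prop := out = NODE_TO_ELEM_alt node_str
instance (node_str : String) (out : String) : Decidable (Spec_NODE_TO_ELEM node_str out) := by unfold Spec_NODE_TO_ELEM; infer_instance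

-- ===== CLAIM (what is proved, stated in full; the proofs are below) =====
def Claim_equal_NODE_TO_ELEM : Prop := ∀ (node_str : String), Dom_NODE_TO_ELEM node_str → Spec_NODE_TO_ELEM node_str (NODE_TO_ELEM node_str)

-- ===== LEMMAS AND PROOFS =====

-- split on a single character, structurally
def splitC (d : Char) : List Char → List (List Char)
  | [] => [[]]
  | c :: t => if c = d then [] :: splitC d t else (splitC d t).modifyHead (c :: ·)

-- the last ':'-token of a segment
def lastTok (t : List Char) : List Char := (splitC ':' t).getLastD []

-- the '|' → '/' character substitution
def repl (c : Char) : Char := if c = '|' then '/' else c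

-- B's scan as a structural recursion producing the list of emitted pieces
def Bspec : List Char → List Char → List (List Char)
  | [], seg => [seg]
  | c :: t, seg =>
    if c = '|' ∨ c = '/' then seg :: Bspec t []
    else if c = ':' then Bspec t []
    else Bspec t (seg ++ [c])

theorem replace_go_single (o n : Char) :
    ∀ (fuel : Nat) (l acc : List Char), l.length ≤ fuel →
      PySem.Chars.replace.go [o] [n] fuel l acc
        = acc.reverse ++ l.map (fun c => if c = o then n else c) := by
  intro fuel
  induction fuel with
  | zero =>
    intro l acc h
    have : l = [] := List.eq_nil_of_length_eq_zero (Nat.le_zero.mp h)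
    subst this
    simp [PySem.Chars.replace.go]
  | succ f ih =>
    intro l acc h
    cases l with
    | nil => simp [PySem.Chars.replace.go]
    | cons c t =>
      rw [PySem.Chars.replace.go]
      have hpre : [o].isPrefixOf (c :: t) = (o == c) := by simp [List.isPrefixOf]
      rw [hpre]
      by_cases hc : o = c
      · subst hc
        simp only [beq_self_eq_true, if_true, List.length_cons, List.length_nil,
          List.drop_succ_cons, List.drop_zero]
        rw [ih t ([n].reverse ++ acc) (by simpa using h)]
        simp
      · have : (o == c) = false := by simp [hc]
        rw [this]
        simp only [Bool.false_eq_true, if_false]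
        rw [ih t (c :: acc) (by simpa using h)]
        simp [Ne.symm hc]

theorem replace_single (l : List Char) (o n : Char) :
    PySem.Chars.replace l [o] [n] = l.map (fun c => if c = o then n else c) := by
  rw [PySem.Chars.replace]
  simp only [List.isEmpty_cons, Bool.false_eq_true, if_false]
  exact replace_go_single o n l.length l [] (le_refl _)

theorem splitOn_go_single (d : Char) :
    ∀ (fuel : Nat) (l cur : List Char) (acc : List (List Char)), l.length ≤ fuel →
      PySem.Chars.splitOn.go [d] fuel l cur acc
        = acc.reverse ++ (splitC d l).modifyHead (cur.reverse ++ ·) := by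
  intro fuel
  induction fuel with
  | zero =>
    intro l cur acc h
    have : l = [] := List.eq_nil_of_length_eq_zero (Nat.le_zero.mp h)
    subst this
    simp [PySem.Chars.splitOn.go, splitC]
  | succ f ih =>
    intro l cur acc h
    cases l with
    | nil => simp [PySem.Chars.splitOn.go, splitC]
    | cons c t =>
      rw [PySem.Chars.splitOn.go]
      have hpre : [d].isPrefixOf (c :: t) = (d == c) := by simp [List.isPrefixOf]
      rw [hpre]
      by_cases hc : d = c
      · subst hc
        simp only [beq_self_eq_true, if_true, List.length_cons, List.length_nil,
          List.drop_succ_cons, List.drop_zero]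
        rw [ih t [] (cur.reverse :: acc) (by simpa using h)]
        simp [splitC]
        show List.modifyHead (fun x => x) (splitC d t) = splitC d t
        rw [show (fun (x : List Char) => x) = id from rfl, List.modifyHead_id, id_eq]
      · have : (d == c) = false := by simp [hc]
        rw [this]
        simp only [Bool.false_eq_true, if_false]
        rw [ih t (c :: cur) acc (by simpa using h)]
        simp only [splitC, if_neg (Ne.symm hc), List.modifyHead_modifyHead]
        simp [Function.comp_def]

theorem splitOn_single (l : List Char) (d : Char) :
    PySem.Chars.splitOn l [d] = splitC d l := by
  rw [PySem.Chars.splitOn, splitOn_go_single d (l.length + 1) l [] [] (Nat.le_succ _)]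
  have : (List.modifyHead (fun x => List.reverse [] ++ x) (splitC d l)) = List.modifyHead (fun x => x) (splitC d l) := by simp
  rw [List.reverse_nil, List.nil_append, this,
    show (fun (x : List Char) => x) = id from rfl, List.modifyHead_id, id_eq]

theorem splitC_ne_nil (d : Char) (l : List Char) : splitC d l ≠ [] := by
  cases l with
  | nil => simp [splitC]
  | cons c t =>
    simp only [splitC]
    split_ifs
    · simp
    · intro hh
      have := congrArg List.length hh
      simp at this
      exact splitC_ne_nil d t this

theorem mem_of_mem_splitC {d a : Char} {x l : List Char} :
    x ∈ splitC d l → a ∈ x → a ∈ l := by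
  induction l generalizing x with
  | nil => intro hx ha; simp [splitC] at hx; subst hx; simp at ha
  | cons c t ih =>
    intro hx ha
    simp only [splitC] at hx
    split_ifs at hx with hc
    · rcases List.mem_cons.mp hx with h | h
      · subst h; simp at ha
      · exact List.mem_cons_of_mem _ (ih h ha)
    · obtain ⟨hh, r, he⟩ : ∃ hh r, splitC d t = hh :: r := by
        cases e : splitC d t with
        | nil => exact absurd e (splitC_ne_nil d t)
        | cons hh r => exact ⟨hh, r, rfl⟩
      rw [he, List.modifyHead_cons] at hx
      rcases List.mem_cons.mp hx with h | h
      · subst h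
        rcases List.mem_cons.mp ha with h' | h'
        · simp [h']
        · exact List.mem_cons_of_mem _ (ih (he ▸ List.mem_cons_self) h')
      · exact List.mem_cons_of_mem _ (ih (he ▸ List.mem_cons_of_mem _ h) ha)

theorem splitC_of_not_mem {d : Char} {l : List Char} (h : d ∉ l) : splitC d l = [l] := by
  induction l with
  | nil => rfl
  | cons c t ih =>
    simp only [splitC]
    rw [if_neg (by intro hh; exact h (hh ▸ List.mem_cons_self)),
      ih (fun hm => h (List.mem_cons_of_mem _ hm))]
    rfl

theorem two_le_length_splitC {d : Char} {l : List Char} (h : d ∈ l) :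
    2 ≤ (splitC d l).length := by
  induction l with
  | nil => simp at h
  | cons c t ih =>
    simp only [splitC]
    split_ifs with hc
    · have h1 : 1 ≤ (splitC d t).length :=
        List.length_pos_of_ne_nil (splitC_ne_nil d t)
      simpa using h1
    · have hd : d ∈ t := by
        rcases List.mem_cons.mp h with h' | h'
        · exact absurd h'.symm hc
        · exact h'
      simpa using ih hd

theorem getLastD_eq_of_ne_nil {α : Type} {l : List α} (h : l ≠ []) (x y : α) :
    l.getLastD x = l.getLastD y := by
  have hz := List.getLast?_eq_some_getLast h
  simp [List.getLastD_eq_getLast?, hz]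

theorem getLastD_splitC_append (d : Char) (xs ys : List Char) :
    (splitC d (xs ++ d :: ys)).getLastD [] = (splitC d ys).getLastD [] := by
  induction xs with
  | nil =>
    simp only [List.nil_append, splitC, if_true, List.getLastD_cons]
  | cons x xs ih =>
    simp only [List.cons_append, splitC]
    split_ifs with hx
    · rw [List.getLastD_cons]
      exact ih
    · obtain ⟨hh, r, he⟩ : ∃ hh r, splitC d (xs ++ d :: ys) = hh :: r := by
        cases e : splitC d (xs ++ d :: ys) with
        | nil => exact absurd e (splitC_ne_nil d _)
        | cons hh r => exact ⟨hh, r, rfl⟩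
      have hr : r ≠ [] := by
        have := two_le_length_splitC (d := d) (l := xs ++ d :: ys)
          (by simp)
        rw [he] at this
        simp only [List.length_cons] at this
        intro h0; rw [h0] at this; simp at this
      rw [he, List.modifyHead_cons, List.getLastD_cons, ← ih, he, List.getLastD_cons]
      exact getLastD_eq_of_ne_nil hr _ _

theorem lastTok_of_not_mem {seg : List Char} (h : ':' ∉ seg) : lastTok seg = seg := by
  rw [lastTok, splitC_of_not_mem h]; rfl

theorem lastTok_append_colon (seg h : List Char) :
    lastTok (seg ++ ':' :: h) = lastTok h := by
  rw [lastTok, lastTok, getLastD_splitC_append]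

theorem join_cons (sep c h : List Char) (r : List (List Char)) :
    PySem.Chars.join sep ((c ++ h) :: r) = c ++ PySem.Chars.join sep (h :: r) := by
  cases r with
  | nil => rw [PySem.Chars.join_singleton, PySem.Chars.join_singleton]
  | cons q r => rw [PySem.Chars.join_cons_cons, PySem.Chars.join_cons_cons]; simp

theorem join_splitC (d : Char) (l : List Char) :
    PySem.Chars.join [d] (splitC d l) = l := by
  induction l with
  | nil => simp [splitC, PySem.Chars.join_singleton]
  | cons c t ih =>
    obtain ⟨hh, r, he⟩ : ∃ hh r, splitC d t = hh :: r := by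
      cases e : splitC d t with
      | nil => exact absurd e (splitC_ne_nil d t)
      | cons hh r => exact ⟨hh, r, rfl⟩
    simp only [splitC]
    split_ifs with hc
    · subst hc
      rw [he, PySem.Chars.join_cons_cons, ← he, ih]
      simp
    · rw [he, List.modifyHead_cons,
        show (c :: hh) = [c] ++ hh from rfl, join_cons, ← he, ih]
      simp

theorem Bspec_eq (cs : List Char) : ∀ (seg : List Char), ':' ∉ seg →
    Bspec cs seg
      = lastTok (seg ++ (splitC '/' (cs.map repl)).headI)
          :: ((splitC '/' (cs.map repl)).tail).map lastTok := by
  induction cs with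
  | nil =>
    intro seg hseg
    simp [Bspec, splitC, lastTok_of_not_mem hseg]
  | cons c t ih =>
    intro seg hseg
    obtain ⟨hh, r, he⟩ : ∃ hh r, splitC '/' (t.map repl) = hh :: r := by
      cases e : splitC '/' (t.map repl) with
      | nil => exact absurd e (splitC_ne_nil _ _)
      | cons hh r => exact ⟨hh, r, rfl⟩
    simp only [List.map_cons, Bspec]
    split_ifs with h1 h2
    · -- c = '|' ∨ c = '/', so repl c = '/'
      have hr : repl c = '/' := by
        rcases h1 with h | h <;> simp [repl, h]
      rw [hr, show splitC '/' ('/' :: t.map repl) = [] :: splitC '/' (t.map repl) from by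
        simp [splitC]]
      rw [he, List.headI_cons, List.tail_cons, List.map_cons]
      rw [ih [] (by simp)]
      rw [he, List.headI_cons, List.tail_cons, List.nil_append,
        List.append_nil, lastTok_of_not_mem hseg]
    · -- c = ':'
      subst h2
      have hr : repl ':' = ':' := by simp [repl]
      rw [hr]
      rw [show splitC '/' (':' :: t.map repl)
          = (splitC '/' (t.map repl)).modifyHead (':' :: ·) from by
        simp [splitC]]
      rw [he, List.modifyHead_cons, List.headI_cons, List.tail_cons]
      rw [ih [] (by simp)]
      rw [he, List.headI_cons, List.tail_cons, List.nil_append,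
        lastTok_append_colon]
    · -- ordinary character
      have hcp : c ≠ '|' := fun h => h1 (Or.inl h)
      have hcs : c ≠ '/' := fun h => h1 (Or.inr h)
      have hr : repl c = c := by simp [repl, hcp]
      rw [hr, show splitC '/' (c :: t.map repl)
          = (splitC '/' (t.map repl)).modifyHead (c :: ·) from by
        simp [splitC, hcs]]
      rw [he, List.modifyHead_cons, List.headI_cons, List.tail_cons]
      rw [ih (seg ++ [c]) (by
        intro hm
        rcases List.mem_append.mp hm with hm | hm
        · exact hseg hm
        · simp at hm; exact h2 hm.symm)]
      rw [he, List.headI_cons, List.tail_cons, List.append_assoc]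
      rfl

theorem singleton_infix_iff (a : Char) (l : List Char) : [a] <:+: l ↔ a ∈ l := by
  constructor
  · intro h; exact h.mem (by simp)
  · intro h
    obtain ⟨s, t, rfl⟩ := List.mem_iff_append.mp h
    exact ⟨s, t, by simp⟩

theorem Bspec_nil_eq (cs : List Char) :
    Bspec cs [] = (splitC '/' (cs.map repl)).map lastTok := by
  obtain ⟨hh, r, he⟩ : ∃ hh r, splitC '/' (cs.map repl) = hh :: r := by
    cases e : splitC '/' (cs.map repl) with
    | nil => exact absurd e (splitC_ne_nil _ _)
    | cons hh r => exact ⟨hh, r, rfl⟩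
  rw [Bspec_eq cs [] (by simp), he]
  simp

-- the Str-level split with a one-character separator, as splitC of the char list
theorem str_split_single (s : String) (d : Char) (sep : String) (hs : sep.toList = [d]) :
    ∃ ts : List String, PySem.Str.split? s sep = some ts
      ∧ ts.map String.toList = splitC d s.toList := by
  have h := PySem.Str.split?_map s sep
  rw [hs] at h
  rw [PySem.Chars.split?] at h
  simp only [List.isEmpty_cons, Bool.false_eq_true, if_false] at h
  cases e : PySem.Str.split? s sep with
  | none => rw [e] at h; simp at h
  | some ts =>
    rw [e] at h
    simp only [Option.map_some, Option.some_inj] at h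
    exact ⟨ts, rfl, by rw [h, splitOn_single]⟩

-- A's per-segment computation extracts the last ':'-token
theorem A_elem_toList (t : String) :
    (PySem.List.pyGetD ((PySem.Str.split? t ":").getD [])
      ((((PySem.Str.split? t ":").getD []).length : Int) - 1) "").toList
      = lastTok t.toList := by
  obtain ⟨ts, he, hm⟩ := str_split_single t ':' ":" (by decide)
  rw [he]
  simp only [Option.getD_some]
  have hne : ts ≠ [] := by
    intro h0
    rw [h0] at hm
    exact splitC_ne_nil ':' t.toList hm.symm
  have hlen : 1 ≤ ts.length := List.length_pos_of_ne_nil hne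
  have hidx : ((ts.length : Int) - 1) = ((ts.length - 1 : Nat) : Int) := by omega
  rw [hidx, PySem.List.pyGetD_natCast]
  rw [lastTok, ← hm]
  have h1 : ts.getD (ts.length - 1) "" = ts.getLast hne := by
    rw [List.getD_eq_getElem _ _ (by omega), List.getLast_eq_getElem]
  have h2 : (ts.map String.toList).getLastD [] = (ts.getLast hne).toList := by
    rw [List.getLastD_eq_getLast?, List.getLast?_map, List.getLast?_eq_some_getLast hne]
    simp
  rw [h1, h2]

-- B's fold emits exactly the pieces Bspec lists
theorem B_foldl (cs : List Char) : ∀ (out : List String) (seg : List Char),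
    (let st := cs.foldl (fun (st : List String × List Char) (c : Char) =>
        if c = '|' || c = '/' then (st.1 ++ [String.ofList st.2], ([] : List Char))
        else if c = ':' then (st.1, [])
        else (st.1, st.2 ++ [c])) (out, seg)
     st.1 ++ [String.ofList st.2])
      = out ++ (Bspec cs seg).map String.ofList := by
  induction cs with
  | nil => intro out seg; simp [Bspec]
  | cons c t ih =>
    intro out seg
    simp only [List.foldl_cons, Bspec]
    by_cases h1 : c = '|' ∨ c = '/'
    · have hb : (c = '|' || c = '/') = true := by
        rcases h1 with h | h <;> simp [h]
      rw [if_pos h1]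
      simp only [hb, if_true]
      rw [ih (out ++ [String.ofList seg]) []]
      simp
    · have hb : (c = '|' || c = '/') = false := by
        rcases not_or.mp h1 with ⟨ha, hb⟩
        simp [ha, hb]
      rw [if_neg h1]
      simp only [hb, Bool.false_eq_true, if_false]
      by_cases h2 : c = ':'
      · rw [if_pos h2, if_pos h2, ih out []]
      · rw [if_neg h2, if_neg h2, ih out (seg ++ [c])]

theorem main_thm (node_str : String) : NODE_TO_ELEM node_str = NODE_TO_ELEM_alt node_str := by
  set cs := node_str.toList with hcs
  -- the replaced string
  have hrep : (PySem.Str.replace node_str "|" "/").toList = cs.map repl := by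
    rw [PySem.Str.toList_replace]
    rw [show ("|" : String).toList = ['|'] from by decide,
      show ("/" : String).toList = ['/'] from by decide]
    rw [replace_single]
    rfl
  -- B's value
  have hB : (NODE_TO_ELEM_alt node_str).toList
      = PySem.Chars.join ['/'] ((splitC '/' (cs.map repl)).map lastTok) := by
    rw [NODE_TO_ELEM_alt]
    rw [B_foldl cs [] []]
    rw [PySem.Str.toList_join]
    rw [List.nil_append, List.map_map, Bspec_nil_eq]
    rw [show ("/" : String).toList = ['/'] from by decide]
    congr 1
    rw [List.map_map]
    apply List.map_congr_left
    intro x _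
    simp [Function.comp]
  rw [NODE_TO_ELEM]
  by_cases hin : PySem.Str.isIn ":" (PySem.Str.replace node_str "|" "/") = true
  · rw [if_pos hin]
    obtain ⟨ts, he, hm⟩ := str_split_single (PySem.Str.replace node_str "|" "/") '/' "/" (by decide)
    rw [he]
    simp only [Option.getD_some]
    rw [PySem.List.foldl_append_singleton_eq_map
      (fun hier_tok => PySem.List.pyGetD ((PySem.Str.split? hier_tok ":").getD [])
        ((((PySem.Str.split? hier_tok ":").getD []).length : Int) - 1) "") ts []]
    rw [List.nil_append]
    apply String.toList_injective
    rw [hB, PySem.Str.toList_join, List.map_map]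
    rw [show ("/" : String).toList = ['/'] from by decide]
    congr 1
    rw [← hrep, ← hm] at *
    rw [List.map_map]
    apply List.map_congr_left
    intro t _
    exact A_elem_toList t
  · rw [if_neg hin]
    have hnc : ':' ∉ cs.map repl := by
      intro hmem
      apply hin
      rw [PySem.Str.isIn_iff_infix, show (":" : String).toList = [':'] from by decide, hrep]
      exact (singleton_infix_iff ':' _).mpr hmem
    apply String.toList_injective
    rw [hB, hrep]
    have : (splitC '/' (cs.map repl)).map lastTok = splitC '/' (cs.map repl) := by
      have := List.map_congr_left (l := splitC '/' (cs.map repl)) (f := lastTok) (g := id)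
        (fun x hx => lastTok_of_not_mem (fun hm' => hnc (mem_of_mem_splitC hx hm')))
      rw [this, List.map_id]
    rw [this, join_splitC]


-- ===== VERDICT (by name: the statement is the Claim_ definition above) =====
theorem NODE_TO_ELEM_spec : Claim_equal_NODE_TO_ELEM := by
  intro node_str _
  show NODE_TO_ELEM node_str = NODE_TO_ELEM_alt node_str
  exact main_thm node_str
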